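-- pv_equiv track=rewrite | github.com/santhoshyennam/ubby-translator | app.py | ubby_translator
-- ===== SOURCE A (Python) =====
-- def ubby_translator(text):
--     vowels = ['a', 'e', 'i', 'o', 'u']
--     ubby_text = ''
--     for character in text:
--         if character.lower() in vowels:
--             ubby_text += 'ub' + character.lower()
--         else:
--             ubby_text += character
--     return ubby_text
-- ===== SOURCE B (Python) =====
-- def ubby_translator(text):
--     # Chunk-based: copy each maximal vowel-free run as one slice, insert
--     # 'ub'+vowel at each vowel position, and join the pieces at the end.
--     chunks = []
--     start = 0
--     for i, c in enumerate(text):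
--         if c in 'aeiouAEIOU':
--             chunks.append(text[start:i])
--             chunks.append('ub' + c.lower())
--             start = i + 1
--     chunks.append(text[start:])
--     return ''.join(chunks)
-- ===== Notes on version B (the rewrite author's own statement) =====
-- stated objective: alternative
-- what changed: Replaces the per-character accumulate-with-if loop by a chunking algorithm: it tracks the start of the current vowel-free run, appends each run as a whole slice plus the marked lowercase vowel to a chunk list, and joins the chunks once at the end.
import Mathlib
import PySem

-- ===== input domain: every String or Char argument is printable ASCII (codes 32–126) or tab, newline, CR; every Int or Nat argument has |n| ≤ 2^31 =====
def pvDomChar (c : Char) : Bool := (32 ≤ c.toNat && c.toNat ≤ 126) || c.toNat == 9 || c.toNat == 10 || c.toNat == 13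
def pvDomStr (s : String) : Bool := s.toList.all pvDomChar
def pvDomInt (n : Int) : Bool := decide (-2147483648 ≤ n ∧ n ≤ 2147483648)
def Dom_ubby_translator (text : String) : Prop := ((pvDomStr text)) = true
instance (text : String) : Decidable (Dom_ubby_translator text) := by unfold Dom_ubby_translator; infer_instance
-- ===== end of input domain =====

-- B replaces A's per-character accumulate-with-if loop by a chunking algorithm:
-- it copies each maximal vowel-free run as one slice, inserts 'ub'+vowel at each
-- vowel position, and joins the chunk list once at the end (alternative; same value).

-- ===== PORT A =====
-- A's loop: for each character, append 'ub'+lower(c) if lower(c) is a vowel, else c.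
def ubby_translator (text : String) : String :=
  String.mk (text.toList.foldl (fun acc c =>
    if (['a','e','i','o','u']).contains (PySem.Chars.lowerChar c) then
      acc ++ ('u' :: 'b' :: [PySem.Chars.lowerChar c])
    else
      acc ++ [c]) [])

-- ===== PORT B =====
-- B's loop: for i, c in enumerate(text): on a vowel, append the slice text[start:i]
-- and 'ub'+c.lower() to the chunk list and set start = i+1; finally append
-- text[start:] and join the chunks.
def ubby_translator_alt (text : String) : String :=
  let l := text.toList
  let r := (PySem.List.enumerate l 0).foldl
    (fun (s : List (List Char) × Int) ic =>
      if ("aeiouAEIOU".toList).contains ic.2 then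
        (s.1 ++ [PySem.List.slice l (some s.2) (some ic.1),
                 'u' :: 'b' :: [PySem.Chars.lowerChar ic.2]], ic.1 + 1)
      else s)
    ([], 0)
  String.mk ((r.1 ++ [PySem.List.slice l (some r.2) none]).flatMap id)

-- ===== PRECONDITION & SPEC =====
def Spec_ubby_translator (text : String) (out : String) : Prop := out = ubby_translator_alt text
instance (text : String) (out : String) : Decidable (Spec_ubby_translator text out) := by unfold Spec_ubby_translator; infer_instance

-- ===== CLAIM =====
def Claim_equal_ubby_translator : Prop := ∀ (text : String), Dom_ubby_translator text → Spec_ubby_translator text (ubby_translator text)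

-- ===== LEMMAS AND PROOFS =====

-- the common per-character result both programs produce
def ubbyStep (c : Char) : List Char :=
  if (("aeiouAEIOU".toList)).contains c then
    'u' :: 'b' :: [PySem.Chars.lowerChar c]
  else [c]

theorem ubby_upper_of (c v V : Char)
    (htn : (Char.ofNat (c.toNat + 32)).toNat = c.toNat + 32)
    (he : Char.ofNat (c.toNat + 32) = v) (hV : V.toNat + 32 = v.toNat) : c = V := by
  have ht := congrArg Char.toNat he
  rw [htn] at ht
  have heq : c.toNat = V.toNat := by omega
  have h1 := Char.ofNat_toNat c
  have h2 := Char.ofNat_toNat V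
  rw [heq] at h1
  rw [← h1, h2]

-- A's test (lowercase in aeiou) agrees with B's test (member of aeiouAEIOU)
theorem ubby_test_eq (c : Char) :
    (['a','e','i','o','u'] : List Char).contains (PySem.Chars.lowerChar c)
      = ("aeiouAEIOU".toList).contains c := by
  by_cases h : c ∈ ("aeiouAEIOU".toList)
  · have h' : c ∈ (['a','e','i','o','u','A','E','I','O','U'] : List Char) := by
      simpa using h
    fin_cases h' <;> decide
  · have h' : c ∉ (['a','e','i','o','u','A','E','I','O','U'] : List Char) := by
      simpa using h
    simp only [List.mem_cons, List.not_mem_nil, or_false] at h'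
    push_neg at h'
    obtain ⟨h1, h2, h3, h4, h5, h6, h7, h8, h9, h10⟩ := h'
    have hr : ("aeiouAEIOU".toList).contains c = false := by
      simp only [List.contains_eq_mem, decide_eq_false_iff_not]
      exact h
    rw [hr]
    unfold PySem.Chars.lowerChar PySem.Chars.isupper
    split
    · next hu =>
      simp only [decide_eq_true_eq, Bool.and_eq_true] at hu
      have h65 : 65 ≤ c.toNat := hu.1
      have h90 : c.toNat ≤ 90 := hu.2
      have hv : (c.toNat + 32).isValidChar := Or.inl (by omega)
      have htn : (Char.ofNat (c.toNat + 32)).toNat = c.toNat + 32 := by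
        rw [Char.toNat_ofNat, if_pos hv]
      simp only [List.contains_eq_mem, decide_eq_false_iff_not, List.mem_cons,
        List.not_mem_nil, or_false]
      rintro (he | he | he | he | he) <;>
        first
        | exact h6 (ubby_upper_of c _ 'A' htn he (by decide))
        | exact h7 (ubby_upper_of c _ 'E' htn he (by decide))
        | exact h8 (ubby_upper_of c _ 'I' htn he (by decide))
        | exact h9 (ubby_upper_of c _ 'O' htn he (by decide))
        | exact h10 (ubby_upper_of c _ 'U' htn he (by decide))
    · simp only [List.contains_eq_mem, decide_eq_false_iff_not, List.mem_cons,
        List.not_mem_nil, or_false]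
      rintro (he | he | he | he | he)
      exacts [h1 he, h2 he, h3 he, h4 he, h5 he]

-- A's fold produces flatMap ubbyStep
theorem ubby_foldl_eq (l : List Char) (acc : List Char) :
    l.foldl (fun acc c =>
      if (['a','e','i','o','u']).contains (PySem.Chars.lowerChar c) then
        acc ++ ('u' :: 'b' :: [PySem.Chars.lowerChar c])
      else acc ++ [c]) acc = acc ++ l.flatMap ubbyStep := by
  induction l generalizing acc with
  | nil => simp
  | cons c t ih =>
    rw [List.foldl_cons, ih, List.flatMap_cons]
    rw [show (if (['a','e','i','o','u'] : List Char).contains (PySem.Chars.lowerChar c) then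
          acc ++ ('u' :: 'b' :: [PySem.Chars.lowerChar c]) else acc ++ [c])
        = acc ++ ubbyStep c by
      unfold ubbyStep; rw [ubby_test_eq c]; split <;> rfl]
    simp

-- invariant of B's chunking fold: the chunks so far plus the open run slice
-- plus the untreated suffix's translation make up the whole translation
theorem ubby_chunk_inv (l : List Char) (t : List Char) (j s : Nat)
    (chunks : List (List Char))
    (hdrop : l.drop j = t) (hsj : s ≤ j) :
    (let r := (PySem.List.enumerate t (j : Int)).foldl
      (fun (st : List (List Char) × Int) ic =>
        if ("aeiouAEIOU".toList).contains ic.2 then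
          (st.1 ++ [PySem.List.slice l (some st.2) (some ic.1),
                    'u' :: 'b' :: [PySem.Chars.lowerChar ic.2]], ic.1 + 1)
        else st)
      (chunks, (s : Int))
     (r.1 ++ [PySem.List.slice l (some r.2) none]).flatMap id)
      = chunks.flatMap id ++ (l.drop s).take (j - s) ++ t.flatMap ubbyStep := by
  induction t generalizing j s chunks with
  | nil =>
    simp only [PySem.List.enumerate_nil, List.foldl_nil, List.flatMap_append,
      List.flatMap_cons, List.flatMap_nil, id, List.append_nil]
    rw [PySem.List.slice_from_natCast]
    have hlen : l.length ≤ j := by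
      have := congrArg List.length hdrop
      simp at this; omega
    have : (l.drop s).take (j - s) = l.drop s := by
      apply List.take_of_length_le
      simp; omega
    simp [this]
  | cons c t ih =>
    have hjlt : j < l.length := by
      have := congrArg List.length hdrop
      simp at this; omega
    have hget : l[j]? = some c := by
      have : (l.drop j)[0]? = some c := by rw [hdrop]; rfl
      simpa [List.getElem?_drop] using this
    have hdrop' : l.drop (j + 1) = t := by
      have : (l.drop j).drop 1 = t := by rw [hdrop]; rfl
      simpa [List.drop_drop, Nat.add_comm] using this
    rw [PySem.List.enumerate_cons, List.foldl_cons]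
    by_cases hv : ("aeiouAEIOU".toList).contains c = true
    · simp only [hv, if_pos]
      rw [show ((j : Int) + 1) = ((j + 1 : Nat) : Int) by push_cast; ring]
      rw [ih (j + 1) (j + 1) _ hdrop' (le_refl _)]
      rw [List.flatMap_cons]
      rw [show ubbyStep c = 'u' :: 'b' :: [PySem.Chars.lowerChar c] by
        unfold ubbyStep; rw [if_pos hv]]
      rw [PySem.List.slice_natCast]
      simp [Nat.sub_self]
    · simp only [hv, if_neg, Bool.false_eq_true, not_false_iff]
      rw [show ((j : Int) + 1) = ((j + 1 : Nat) : Int) by push_cast; ring]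
      rw [ih (j + 1) s _ hdrop' (by omega)]
      rw [List.flatMap_cons]
      rw [show ubbyStep c = [c] by unfold ubbyStep; rw [if_neg hv]]
      have htake : (l.drop s).take (j + 1 - s) = (l.drop s).take (j - s) ++ [c] := by
        rw [show j + 1 - s = (j - s) + 1 by omega, List.take_succ]
        congr 1
        have : (l.drop s)[j - s]? = l[s + (j - s)]? := by
          rw [List.getElem?_drop]
        rw [this, show s + (j - s) = j by omega, hget]
        rfl
      rw [htake]
      simp [List.append_assoc]

-- ===== VERDICT =====
theorem ubby_translator_spec : Claim_equal_ubby_translator := by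
  intro text _
  unfold Spec_ubby_translator ubby_translator
  simp only [ubby_translator_alt]
  rw [ubby_foldl_eq]
  have := ubby_chunk_inv text.toList text.toList 0 0 [] (by simp) (le_refl 0)
  simp only [Nat.cast_zero] at this
  rw [this]
  simp
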